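-- pv_equiv track=rewrite | github.com/smartwhatt/dsde-2025-project | app/pages/affiliations.py | format_badges_html
-- ===== SOURCE A (Python) =====
-- def format_badges_html(items_str, selected_items=None):
--     """Helper to generate HTML badges for items (affiliations or keywords)."""
--     if not items_str:
--         return ""
--
--     items = [item.strip() for item in str(items_str).split(',')]
--     html_parts = []
--     limit = 4
--
--     # Separate selected and non-selected items
--     selected = []
--     non_selected = []
--
--     if selected_items:
--         selected_set = set(selected_items)
--         for item in items:
--             if item in selected_set:
--                 selected.append(item)
--             else:
--                 non_selected.append(item)
--     else:
--         non_selected = items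
--
--     # Display selected items first with primary color
--     displayed_items = selected + non_selected
--
--     for i, item in enumerate(displayed_items[:limit]):
--         if selected_items and item in selected_items:
--             # Highlight selected affiliations
--             html_parts.append(
--                 f'<span class="badge rounded-pill bg-primary text-white border me-1" style="font-weight: 500;">{item}</span>'
--             )
--         else:
--             html_parts.append(
--                 f'<span class="badge rounded-pill bg-light text-dark border me-1" style="font-weight: normal;">{item}</span>'
--             )
--
--     # Add counter badge if there are more items
--     if len(displayed_items) > limit:
--         html_parts.append(
--             f'<span class="badge rounded-pill bg-light text-muted border" style="font-size: 0.7em;">+{len(displayed_items) - limit}</span>'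
--         )
--
--     return "".join(html_parts)
-- ===== SOURCE B (Python) =====
-- def format_badges_html(items_str, selected_items=None):
--     """Generate HTML badges: selected items first via one stable sort, then one badge pass."""
--     if not items_str:
--         return ""
--     items = [item.strip() for item in str(items_str).split(',')]
--     sel = set(selected_items) if selected_items else set()
--     displayed = sorted(items, key=lambda it: it not in sel)
--     parts = [
--         f'<span class="badge rounded-pill bg-primary text-white border me-1" style="font-weight: 500;">{it}</span>'
--         if it in sel else
--         f'<span class="badge rounded-pill bg-light text-dark border me-1" style="font-weight: normal;">{it}</span>'
--         for it in displayed[:4]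
--     ]
--     if len(items) > 4:
--         parts.append(
--             f'<span class="badge rounded-pill bg-light text-muted border" style="font-size: 0.7em;">+{len(items) - 4}</span>'
--         )
--     return "".join(parts)
-- ===== Notes on version B (the rewrite author's own statement) =====
-- stated objective: simpler
-- what changed: Replaces A's explicit two-list partition scan and index-enumerating append loop with a single stable sort by set-membership (selected first) followed by one comprehension over the first four items; the counter uses len(items) directly.
import Mathlib
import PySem

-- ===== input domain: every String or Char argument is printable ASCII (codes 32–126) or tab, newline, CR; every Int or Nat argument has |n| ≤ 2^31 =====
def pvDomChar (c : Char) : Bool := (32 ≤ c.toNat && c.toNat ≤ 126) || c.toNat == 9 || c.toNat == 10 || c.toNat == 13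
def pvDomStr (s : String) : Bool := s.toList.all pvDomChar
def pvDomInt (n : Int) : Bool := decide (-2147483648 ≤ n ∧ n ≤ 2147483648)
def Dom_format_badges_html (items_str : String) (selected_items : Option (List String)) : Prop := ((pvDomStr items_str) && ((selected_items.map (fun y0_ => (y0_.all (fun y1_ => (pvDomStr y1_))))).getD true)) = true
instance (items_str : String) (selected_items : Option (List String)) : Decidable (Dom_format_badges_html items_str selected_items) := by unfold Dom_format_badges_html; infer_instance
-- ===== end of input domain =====

-- B replaces A's explicit two-list partition and append loop by one stable sort on set-membership
-- plus a single badge comprehension (objective: simpler).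

-- ===== PORT A =====
-- badge strings (the f-string bodies; '++' only concatenates the fixed literal around the item)
def pvBadgeSelected (item : String) : String :=
  "<span class=\"badge rounded-pill bg-primary text-white border me-1\" style=\"font-weight: 500;\">" ++ item ++ "</span>"
def pvBadgePlain (item : String) : String :=
  "<span class=\"badge rounded-pill bg-light text-dark border me-1\" style=\"font-weight: normal;\">" ++ item ++ "</span>"
def pvBadgeCounter (n : Int) : String :=
  "<span class=\"badge rounded-pill bg-light text-muted border\" style=\"font-size: 0.7em;\">+" ++ PySem.Int.toStr n ++ "</span>"
-- Python truthiness of the Optional[list] parameter: None and [] are falsy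
def pvTruthy (o : Option (List String)) : Bool :=
  match o with
  | some (_ :: _) => true
  | _ => false

def format_badges_html (items_str : String) (selected_items : Option (List String)) : String :=
  if items_str = "" then ""
  else
    let items := ((PySem.Str.split? items_str ",").getD []).map PySem.Str.strip  -- split? = some here (sep "," ≠ "")
    -- separate selected and non-selected items (appending, as A's loop does)
    let pair :=
      if pvTruthy selected_items then
        let sset := PySem.Set.ofList (selected_items.getD [])
        items.foldl
          (fun (acc : List String × List String) item =>
            if PySem.Set.contains sset item then (acc.1 ++ [item], acc.2)
            else (acc.1, acc.2 ++ [item]))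
          ([], [])
      else ([], items)
    let displayed := pair.1 ++ pair.2
    -- badge loop over displayed[:4]; 'item in selected_items' is LIST membership here, as in A
    let html_parts :=
      (displayed.take 4).foldl
        (fun (parts : List String) item =>
          if pvTruthy selected_items && (selected_items.getD []).contains item then
            parts ++ [pvBadgeSelected item]
          else
            parts ++ [pvBadgePlain item])
        []
    let html_parts :=
      if displayed.length > 4 then html_parts ++ [pvBadgeCounter ((displayed.length : Int) - 4)]
      else html_parts
    PySem.Str.join "" html_parts

-- ===== PORT B =====
def format_badges_html_alt (items_str : String) (selected_items : Option (List String)) : String :=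
  if items_str = "" then ""
  else
    let items := ((PySem.Str.split? items_str ",").getD []).map PySem.Str.strip  -- split? = some here (sep "," ≠ "")
    let sel : PySem.Set String :=
      match selected_items with
      | some (x :: xs) => PySem.Set.ofList (x :: xs)
      | _ => PySem.Set.empty
    -- key 'it not in sel' : False < True ported as Int 0 < 1 (exact: Python sorts bools as ints)
    let displayed :=
      PySem.List.sorted items (fun it => if PySem.Set.contains sel it then (0 : Int) else 1) false
    let parts :=
      (displayed.take 4).map
        (fun it => if PySem.Set.contains sel it then pvBadgeSelected it else pvBadgePlain it)
    let parts :=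
      if items.length > 4 then parts ++ [pvBadgeCounter ((items.length : Int) - 4)]
      else parts
    PySem.Str.join "" parts

-- ===== PRECONDITION & SPEC =====
def Spec_format_badges_html (items_str : String) (selected_items : Option (List String)) (out : String) : Prop := out = format_badges_html_alt items_str selected_items
instance (items_str : String) (selected_items : Option (List String)) (out : String) : Decidable (Spec_format_badges_html items_str selected_items out) := by unfold Spec_format_badges_html; infer_instance

-- ===== CLAIM (what is proved, stated in full; the proofs are below) =====
def Claim_equal_format_badges_html : Prop := ∀ (items_str : String) (selected_items : Option (List String)), Dom_format_badges_html items_str selected_items → Spec_format_badges_html items_str selected_items (format_badges_html items_str selected_items)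

-- ===== LEMMAS AND PROOFS =====

-- inserting a 0-key element into a (0s ++ 1s) list puts it at the end of the 0s
lemma insertBy_zero_block (p : String → Bool) (x : String) (hx : p x = true)
    (F G : List String) (hF : ∀ a ∈ F, p a = true) (hG : ∀ a ∈ G, p a = false) :
    PySem.List.insertBy
      (fun a b => decide ((if p a then (0 : Int) else 1) < (if p b then (0 : Int) else 1)))
      x (F ++ G) = (F ++ [x]) ++ G := by
  induction F with
  | nil =>
    cases G with
    | nil => simp [PySem.List.insertBy]
    | cons g gs =>
      have := hG g (by simp)
      simp [PySem.List.insertBy, hx, this]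
  | cons f fs ih =>
    have hf := hF f (by simp)
    have hrec := ih (fun a ha => hF a (by simp [ha]))
    simp only [List.cons_append, PySem.List.insertBy, hx, hf, decide_eq_true_eq]
    rw [if_neg (by omega), hrec]

-- the insertion-sort fold over a binary key keeps the accumulator as (0-block ++ 1-block)
lemma foldl_insertBy_binary (p : String → Bool) (xs : List String) :
    ∀ F G : List String, (∀ a ∈ F, p a = true) → (∀ a ∈ G, p a = false) →
    xs.foldl
      (fun acc x => PySem.List.insertBy
        (fun a b => decide ((if p a then (0 : Int) else 1) < (if p b then (0 : Int) else 1)))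
        x acc) (F ++ G)
      = (F ++ xs.filter p) ++ (G ++ xs.filter (fun a => !p a)) := by
  induction xs with
  | nil => intro F G _ _; simp
  | cons x xs ih =>
    intro F G hF hG
    by_cases hx : p x = true
    · have hF' : ∀ a ∈ F ++ [x], p a = true := by
        intro a ha
        rcases List.mem_append.1 ha with h | h
        · exact hF a h
        · simp at h; simpa [h] using hx
      rw [List.foldl_cons, insertBy_zero_block p x hx F G hF hG, ih (F ++ [x]) G hF' hG]
      simp [hx]
    · have hx' : p x = false := by simpa using hx
      have hG' : ∀ a ∈ G ++ [x], p a = false := by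
        intro a ha
        rcases List.mem_append.1 ha with h | h
        · exact hG a h
        · simp at h; simpa [h] using hx'
      have hnb : ∀ y ∈ F ++ G,
          decide ((if p x then (0 : Int) else 1) < (if p y then (0 : Int) else 1)) = false := by
        intro y hy
        rcases List.mem_append.1 hy with h | h
        · simp [hF y h, hx']
        · simp [hG y h, hx']
      rw [List.foldl_cons, PySem.List.insertBy_of_forall_not_before _ _ _ hnb,
        List.append_assoc F G [x], ih F (G ++ [x]) hF hG']
      simp [hx']

-- sorting by a two-valued key IS the stable partition
lemma sorted_binary (p : String → Bool) (xs : List String) :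
    PySem.List.sorted xs (fun it => if p it then (0 : Int) else 1) false
      = xs.filter p ++ xs.filter (fun a => !p a) := by
  rw [PySem.List.sorted_eq_foldl_insertBy]
  simpa using foldl_insertBy_binary p xs [] [] (by simp) (by simp)

-- A's partition fold computes the two filters
lemma partition_foldl (p : String → Bool) (xs : List String) :
    ∀ F G : List String,
    xs.foldl (fun (acc : List String × List String) item =>
        if p item then (acc.1 ++ [item], acc.2) else (acc.1, acc.2 ++ [item])) (F, G)
      = (F ++ xs.filter p, G ++ xs.filter (fun a => !p a)) := by
  induction xs with
  | nil => intro F G; simp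
  | cons x xs ih =>
    intro F G
    by_cases hx : p x
    · simp [List.foldl_cons, hx, ih]
    · have hx' : p x = false := by simpa using hx
      simp [List.foldl_cons, hx', ih]

-- A's badge-append fold is a map
lemma foldl_badges (f : String → String) (xs : List String) :
    ∀ acc : List String,
    xs.foldl (fun (parts : List String) item => parts ++ [f item]) acc = acc ++ xs.map f := by
  induction xs with
  | nil => intro acc; simp
  | cons x xs ih => intro acc; simp [List.foldl_cons, ih]

lemma filter_partition_length (p : String → Bool) (xs : List String) :
    (xs.filter p ++ xs.filter (fun a => !p a)).length = xs.length :=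
  (List.filter_append_perm p xs).length_eq

-- the two badge pipelines agree once the display order is the stable partition
lemma final_eq (items : List String) (p : String → Bool) (cond : String → Bool)
    (hc : ∀ it, cond it = p it) :
    (let displayed := items.filter p ++ items.filter (fun a => !p a)
     let parts := (displayed.take 4).foldl
        (fun (parts : List String) item =>
          if cond item then parts ++ [pvBadgeSelected item] else parts ++ [pvBadgePlain item]) []
     let parts := if displayed.length > 4 then parts ++ [pvBadgeCounter ((displayed.length : Int) - 4)] else parts
     PySem.Str.join "" parts)
    =
    (let displayed := PySem.List.sorted items (fun it => if p it then (0 : Int) else 1) false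
     let parts := (displayed.take 4).map
        (fun it => if p it then pvBadgeSelected it else pvBadgePlain it)
     let parts := if items.length > 4 then parts ++ [pvBadgeCounter ((items.length : Int) - 4)] else parts
     PySem.Str.join "" parts) := by
  simp only
  rw [sorted_binary p items]
  set E := items.filter p ++ items.filter (fun a => !p a) with hE
  have hlen : E.length = items.length := filter_partition_length p items
  have hfun : (fun (parts : List String) item =>
        if cond item then parts ++ [pvBadgeSelected item] else parts ++ [pvBadgePlain item])
      = (fun (parts : List String) item =>
        parts ++ [if p item then pvBadgeSelected item else pvBadgePlain item]) := by
    funext parts item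
    rw [hc item]
    by_cases h : p item <;> simp [h]
  rw [hfun, foldl_badges, hlen]
  simp

-- ===== VERDICT (by name: the statement is the Claim_ definition above) =====
theorem format_badges_html_spec : Claim_equal_format_badges_html := by
  intro items_str selected_items hDom
  unfold Spec_format_badges_html format_badges_html format_badges_html_alt
  by_cases hs : items_str = ""
  · simp [hs]
  · simp only [hs, if_false]
    set items := ((PySem.Str.split? items_str ",").getD []).map PySem.Str.strip with hitems
    match selected_items with
    | none =>
      have hfilt : items.filter (fun it => PySem.Set.contains (PySem.Set.empty (α := String)) it) = []
          := List.filter_eq_nil_iff.2 (fun a _ => by simp [pysem, PySem.Set.empty])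
      have hfilt' : items.filter (fun it => !PySem.Set.contains (PySem.Set.empty (α := String)) it) = items
          := List.filter_eq_self.2 (fun a _ => by simp [pysem, PySem.Set.empty])
      have := final_eq items (fun it => PySem.Set.contains (PySem.Set.empty (α := String)) it)
        (fun item => pvTruthy none && (Option.getD (α := List String) none []).contains item)
        (by intro it; simp [pvTruthy, pysem, PySem.Set.empty])
      simp only [hfilt, hfilt', List.nil_append] at this
      simpa [pvTruthy] using this
    | some [] =>
      have hfilt : items.filter (fun it => PySem.Set.contains (PySem.Set.empty (α := String)) it) = []
          := List.filter_eq_nil_iff.2 (fun a _ => by simp [pysem, PySem.Set.empty])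
      have hfilt' : items.filter (fun it => !PySem.Set.contains (PySem.Set.empty (α := String)) it) = items
          := List.filter_eq_self.2 (fun a _ => by simp [pysem, PySem.Set.empty])
      have := final_eq items (fun it => PySem.Set.contains (PySem.Set.empty (α := String)) it)
        (fun item => pvTruthy (some []) && (Option.getD (α := List String) (some []) []).contains item)
        (by intro it; simp [pvTruthy, pysem, PySem.Set.empty])
      simp only [hfilt, hfilt', List.nil_append] at this
      simpa [pvTruthy] using this
    | some (x :: xs) =>
      rw [show (Option.getD (α := List String) (some (x :: xs)) []) = x :: xs from rfl]
      have hpart := partition_foldl (fun it => PySem.Set.contains (PySem.Set.ofList (x :: xs)) it) items [] []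
      simp only [List.nil_append] at hpart
      have hc : ∀ it : String,
          (pvTruthy (some (x :: xs)) && (Option.getD (α := List String) (some (x :: xs)) []).contains it)
            = (fun it => PySem.Set.contains (PySem.Set.ofList (x :: xs)) it) it := by
        intro it
        simp [pvTruthy, pysem]
        by_cases hx0 : it = x <;> simp [hx0]
      have hfin := final_eq items (fun it => PySem.Set.contains (PySem.Set.ofList (x :: xs)) it)
        (fun item => pvTruthy (some (x :: xs)) && (Option.getD (α := List String) (some (x :: xs)) []).contains item)
        hc
      simp only [pvTruthy, Option.getD_some, if_true] at hfin ⊢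
      rw [hpart]
      exact hfin
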